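-- pv_equiv track=rewrite | github.com/kanngji/thisisCodingTest | programmers/lv0/94.py | solution
-- ===== SOURCE A (Python) =====
-- def solution(a, b):
--     answer = 1
--     ch=[0]*(b+1)
--     # 약분 해준다
--     for i in range(2,a+1):
--         if a % i==0 and b%i==0:
--             a//=i
--             b//=i
--
--     # b 소인수 분해
--     count=2
--     while b!=1:
--         if b%count==0:
--             b//=count
--             ch[count]+=1
--         else:
--             count+=1
--
--     for idx,val in enumerate(ch):
--         if idx == 2 or idx==5:
--             continue
--         elif val!=0:
--             answer=2
--
--     return answer
-- ===== SOURCE B (Python) =====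
-- def solution(a, b):
--     # same single-pass reduction as the original (its exact semantics matter)
--     for i in range(2, a + 1):
--         if a % i == 0 and b % i == 0:
--             a //= i
--             b //= i
--     # terminating decimal iff, after stripping factors 2 and 5, b becomes 1
--     while b % 2 == 0:
--         b //= 2
--     while b % 5 == 0:
--         b //= 5
--     return 1 if b == 1 else 2
-- ===== Notes on version B (the rewrite author's own statement) =====
-- stated objective: faster
-- what changed: Replaces the trial-division factorization of b (counting every prime factor into a tally array, advancing a counter one by one up to b's largest prime factor) and the final scan of that array by directly stripping the factors 2 and 5 from the reduced b and testing whether 1 remains.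
import Mathlib
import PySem

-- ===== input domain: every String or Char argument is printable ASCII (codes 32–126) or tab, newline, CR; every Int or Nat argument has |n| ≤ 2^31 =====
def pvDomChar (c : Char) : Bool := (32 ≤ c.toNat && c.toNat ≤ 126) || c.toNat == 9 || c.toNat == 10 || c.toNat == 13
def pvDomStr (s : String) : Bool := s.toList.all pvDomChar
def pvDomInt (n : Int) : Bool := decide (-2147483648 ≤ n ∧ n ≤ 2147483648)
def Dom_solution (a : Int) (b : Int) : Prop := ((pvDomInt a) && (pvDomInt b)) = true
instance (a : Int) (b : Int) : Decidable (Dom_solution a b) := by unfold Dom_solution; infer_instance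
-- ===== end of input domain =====

-- B replaces A's full trial-division factorization of b (tally array + final scan)
-- by stripping the factors 2 and 5 from the reduced b and testing whether 1 remains.

-- ===== PORT A =====
-- the 'while b!=1' trial-division loop of A, with a fuel bound as a totality guard
-- (inside Pre_solution the fuel chosen at the call site is proved sufficient)
def pvFactLoop (fuel : Nat) (b : Int) (count : Int) (ch : List Int) : Int × List Int :=
  match fuel with
  | 0 => (b, ch)
  | n + 1 =>
    if b != 1 then
      if PySem.Int.mod b count == 0 then
        pvFactLoop n (PySem.Int.floordiv b count) count
          (ch.set count.toNat (PySem.List.pyGetD ch count 0 + 1))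
      else
        pvFactLoop n b (count + 1) ch
    else (b, ch)

def solution (a : Int) (b : Int) : Int :=
  let ch : List Int := List.replicate (b + 1).toNat 0
  let st :=
    (PySem.List.pyRange 2 (a + 1) 1).foldl
      (fun (st : Int × Int) i =>
        if PySem.Int.mod st.1 i == 0 && PySem.Int.mod st.2 i == 0 then
          (PySem.Int.floordiv st.1 i, PySem.Int.floordiv st.2 i)
        else st) (a, b)
  let res := pvFactLoop (2 * st.2).toNat st.2 2 ch
  -- 'for idx, val in enumerate(ch)': the index is carried explicitly through the fold
  (res.2.foldl
    (fun (p : Int × Int) val =>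
      (p.1 + 1,
        if p.1 == 2 || p.1 == 5 then p.2
        else if val != 0 then (2 : Int) else p.2)) (0, 1)).2

-- ===== PORT B =====
-- 'while b % p == 0: b //= p', with a fuel bound as a totality guard
def pvStrip (fuel : Nat) (b : Int) (p : Int) : Int :=
  match fuel with
  | 0 => b
  | n + 1 =>
    if PySem.Int.mod b p == 0 then pvStrip n (PySem.Int.floordiv b p) p else b

def solution_alt (a : Int) (b : Int) : Int :=
  let st :=
    (PySem.List.pyRange 2 (a + 1) 1).foldl
      (fun (st : Int × Int) i =>
        if PySem.Int.mod st.1 i == 0 && PySem.Int.mod st.2 i == 0 then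
          (PySem.Int.floordiv st.1 i, PySem.Int.floordiv st.2 i)
        else st) (a, b)
  let b1 := pvStrip st.2.toNat st.2 2
  let b2 := pvStrip b1.toNat b1 5
  if b2 == 1 then 1 else 2

-- ===== PRECONDITION & SPEC =====
-- A raises IndexError for b = 0 and loops forever for b < 0; it returns exactly when 1 ≤ b.
def Pre_solution (a : Int) (b : Int) : Prop := 1 ≤ b
instance (a : Int) (b : Int) : Decidable (Pre_solution a b) := by unfold Pre_solution; infer_instance
def pvWitness_solution : Int × Int := (3, 6)

def Spec_solution (a : Int) (b : Int) (out : Int) : Prop := out = solution_alt a b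
instance (a : Int) (b : Int) (out : Int) : Decidable (Spec_solution a b out) := by unfold Spec_solution; infer_instance

-- ===== CLAIM (what is proved, stated in full; the proofs are below) =====
def Claim_equal_solution : Prop := ∀ (a : Int) (b : Int), Dom_solution a b → Pre_solution a b → Spec_solution a b (solution a b)

-- ===== LEMMAS AND PROOFS =====

-- one division step: b // p for a positive divisor p of a positive b
theorem pvDivStep (b p : Int) (hp : 2 ≤ p) (hd : p ∣ b) (hb : 1 ≤ b) :
    1 ≤ PySem.Int.floordiv b p ∧ PySem.Int.floordiv b p < b ∧
    PySem.Int.floordiv b p ∣ b ∧ b = p * PySem.Int.floordiv b p := by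
  obtain ⟨k, hk⟩ := hd
  have hfd : PySem.Int.floordiv b p = k := by
    rw [PySem.Int.floordiv_eq_ediv_of_pos (by omega), hk, Int.mul_ediv_cancel_left _ (by omega)]
  have hk1 : 1 ≤ k := by nlinarith
  refine ⟨by omega, by nlinarith, ⟨p, by rw [hfd, hk]; ring⟩, by rw [hfd, hk]⟩

-- fuel irrelevance for pvStrip above the threshold b.toNat
theorem pvStrip_irrel (f f' : Nat) (b p : Int) (hb : 1 ≤ b) (hp : 2 ≤ p)
    (h1 : b.toNat ≤ f) (h2 : b.toNat ≤ f') : pvStrip f b p = pvStrip f' b p := by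
  induction f generalizing f' b with
  | zero => omega
  | succ n ih =>
    obtain ⟨m, rfl⟩ : ∃ m, f' = m + 1 := ⟨f' - 1, by omega⟩
    by_cases hd : p ∣ b
    · have hm : PySem.Int.mod b p = 0 := (PySem.Int.mod_eq_zero_iff_dvd b p).mpr hd
      obtain ⟨hpos, hlt, _, _⟩ := pvDivStep b p hp hd hb
      simp only [pvStrip, hm, BEq.rfl, if_true]
      exact ih _ _ hpos (by omega) (by omega)
    · have hm : PySem.Int.mod b p ≠ 0 := fun h => hd ((PySem.Int.mod_eq_zero_iff_dvd b p).mp h)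
      simp [pvStrip, hm]

theorem pvStrip_pos (f : Nat) (b p : Int) (hb : 1 ≤ b) (hp : 2 ≤ p) :
    1 ≤ pvStrip f b p := by
  induction f generalizing b with
  | zero => exact hb
  | succ n ih =>
    by_cases hd : p ∣ b
    · have hm : PySem.Int.mod b p = 0 := (PySem.Int.mod_eq_zero_iff_dvd b p).mpr hd
      obtain ⟨hpos, _, _, _⟩ := pvDivStep b p hp hd hb
      simp only [pvStrip, hm, BEq.rfl, if_true]
      exact ih _ hpos
    · have hm : PySem.Int.mod b p ≠ 0 := fun h => hd ((PySem.Int.mod_eq_zero_iff_dvd b p).mp h)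
      simpa [pvStrip, hm] using hb

-- a prime q ≠ p dividing b still divides the stripped value
theorem pvStrip_prime_dvd (f : Nat) (b p q : Int) (hb : 1 ≤ b) (hp : 2 ≤ p)
    (hq : Prime q) (hqb : q ∣ b) (hqp : ¬ q ∣ p) : q ∣ pvStrip f b p := by
  induction f generalizing b with
  | zero => exact hqb
  | succ n ih =>
    by_cases hd : p ∣ b
    · have hm : PySem.Int.mod b p = 0 := (PySem.Int.mod_eq_zero_iff_dvd b p).mpr hd
      obtain ⟨hpos, _, _, heq⟩ := pvDivStep b p hp hd hb
      simp only [pvStrip, hm, BEq.rfl, if_true]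
      refine ih _ hpos ?_
      rcases hq.dvd_or_dvd (heq ▸ hqb) with h | h
      · exact absurd h hqp
      · exact h
    · have hm : PySem.Int.mod b p ≠ 0 := fun h => hd ((PySem.Int.mod_eq_zero_iff_dvd b p).mp h)
      simpa [pvStrip, hm] using hqb

-- B's classification value of a positive integer b
def pvG (b : Int) : Int := pvStrip (pvStrip b.toNat b 2).toNat (pvStrip b.toNat b 2) 5

theorem pvG_one : pvG 1 = 1 := by decide

theorem pvG_two (b : Int) (hb : 1 ≤ b) (hd : (2 : Int) ∣ b) :
    pvG b = pvG (PySem.Int.floordiv b 2) := by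
  obtain ⟨hpos, hlt, _, _⟩ := pvDivStep b 2 (by omega) hd hb
  have hm : PySem.Int.mod b 2 = 0 := (PySem.Int.mod_eq_zero_iff_dvd b 2).mpr hd
  have s2 : pvStrip b.toNat b 2 = pvStrip (PySem.Int.floordiv b 2).toNat (PySem.Int.floordiv b 2) 2 := by
    obtain ⟨n, hn⟩ : ∃ n, b.toNat = n + 1 := ⟨b.toNat - 1, by omega⟩
    rw [hn]
    simp only [pvStrip, hm, BEq.rfl, if_true]
    exact pvStrip_irrel _ _ _ _ hpos (by omega) (by omega) le_rfl
  unfold pvG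
  rw [s2]

theorem pvG_five (b : Int) (hb : 1 ≤ b) (h2 : ¬ (2 : Int) ∣ b) (hd : (5 : Int) ∣ b) :
    pvG b = pvG (PySem.Int.floordiv b 5) := by
  obtain ⟨hpos, hlt, hdvd, _⟩ := pvDivStep b 5 (by omega) hd hb
  have hm : PySem.Int.mod b 5 = 0 := (PySem.Int.mod_eq_zero_iff_dvd b 5).mpr hd
  have hm2 : PySem.Int.mod b 2 ≠ 0 := fun h => h2 ((PySem.Int.mod_eq_zero_iff_dvd b 2).mp h)
  have h2' : ¬ (2 : Int) ∣ PySem.Int.floordiv b 5 := fun h => h2 (h.trans hdvd)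
  have hm2' : PySem.Int.mod (PySem.Int.floordiv b 5) 2 ≠ 0 := fun h =>
    h2' ((PySem.Int.mod_eq_zero_iff_dvd _ 2).mp h)
  -- stripping 2 is the identity on both sides
  have e1 : pvStrip b.toNat b 2 = b := by
    obtain ⟨n, hn⟩ : ∃ n, b.toNat = n + 1 := ⟨b.toNat - 1, by omega⟩
    have hb2 : (PySem.Int.mod b 2 == 0) = false := beq_eq_false_iff_ne.mpr hm2
    rw [hn]; simp only [pvStrip, hb2, Bool.false_eq_true, if_false]
  have e2 : pvStrip (PySem.Int.floordiv b 5).toNat (PySem.Int.floordiv b 5) 2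
      = PySem.Int.floordiv b 5 := by
    obtain ⟨n, hn⟩ : ∃ n, (PySem.Int.floordiv b 5).toNat = n + 1 := ⟨(PySem.Int.floordiv b 5).toNat - 1, by omega⟩
    have hb2' : (PySem.Int.mod (PySem.Int.floordiv b 5) 2 == 0) = false := beq_eq_false_iff_ne.mpr hm2'
    rw [hn]; simp only [pvStrip, hb2', Bool.false_eq_true, if_false]
  unfold pvG
  rw [e1, e2]
  obtain ⟨n, hn⟩ : ∃ n, b.toNat = n + 1 := ⟨b.toNat - 1, by omega⟩
  rw [hn]
  simp only [pvStrip, hm, BEq.rfl, if_true]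
  exact pvStrip_irrel _ _ _ _ hpos (by omega) (by omega) le_rfl

theorem pvG_ne_one (b q : Int) (hb : 1 ≤ b) (hq : Prime q) (hq2geq : 2 ≤ q)
    (hqb : q ∣ b) (h2 : ¬ q ∣ 2) (h5 : ¬ q ∣ 5) : pvG b ≠ 1 := by
  have hs2 : q ∣ pvStrip b.toNat b 2 := pvStrip_prime_dvd _ _ _ _ hb (by omega) hq hqb h2
  have hp2 : 1 ≤ pvStrip b.toNat b 2 := pvStrip_pos _ _ _ hb (by omega)
  have hs5 : q ∣ pvG b := pvStrip_prime_dvd _ _ _ _ hp2 (by omega) hq hs2 h5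
  intro h
  rw [h] at hs5
  have := Int.le_of_dvd (by omega) hs5
  omega

-- the least divisor ≥ 2 of b is prime
theorem pvInvPrime (b c : Int) (hb : 1 ≤ b) (hc : 2 ≤ c) (hd : c ∣ b)
    (hinv : ∀ d : Int, 2 ≤ d → d < c → ¬ d ∣ b) : Prime c := by
  have hcn : c.toNat.Prime := by
    rw [Nat.prime_def_lt]
    refine ⟨by omega, fun m hm hmd => ?_⟩
    by_contra hm1
    have hm0 : m ≠ 0 := by
      rintro rfl
      simp only [Nat.zero_dvd] at hmd
      omega
    have h2m : 2 ≤ m := by omega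
    have hmdInt : (m : Int) ∣ c := Int.natCast_dvd_natCast.mpr hmd |>.trans
      (by rw [Int.toNat_of_nonneg (by omega)])
    exact hinv m (by exact_mod_cast h2m) (by omega) (hmdInt.trans hd)
  have := Nat.prime_iff_prime_int.mp hcn
  rwa [Int.toNat_of_nonneg (by omega)] at this

-- A's final scan as an 'any' over the enumerated tally list
def pvBad (iv : Int × Int) : Bool := !(iv.1 == 2 || iv.1 == 5) && iv.2 != 0

theorem pvScan_foldl (l : List (Int × Int)) (init : Int) :
    l.foldl (fun ans iv =>
      if iv.1 == 2 || iv.1 == 5 then ans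
      else if iv.2 != 0 then (2 : Int) else ans) init
    = if l.any pvBad then 2 else init := by
  induction l generalizing init with
  | nil => simp
  | cons x l ih =>
    obtain ⟨i, v⟩ := x
    simp only [List.foldl_cons, List.any_cons, ih, pvBad]
    by_cases h25 : (i == 2 || i == 5) = true
    · simp only [h25, if_true, Bool.not_true, Bool.false_and, Bool.false_or]
    · simp only [Bool.not_eq_true] at h25
      by_cases hv : (v != 0) = true
      · simp only [h25, hv, Bool.false_eq_true, if_false, Bool.not_false,
          Bool.true_and, Bool.true_or, if_pos trivial]
        simp
      · simp only [Bool.not_eq_true] at hv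
        simp only [h25, hv, Bool.false_eq_true, if_false, Bool.not_false, Bool.and_false,
          Bool.false_or]

def pvC (ch : List Int) : Bool := (PySem.List.enumerate ch 0).any pvBad

theorem pvScanIdx (l : List Int) (s : Int) (init : Int) :
    l.foldl (fun (p : Int × Int) val =>
      (p.1 + 1,
        if p.1 == 2 || p.1 == 5 then p.2
        else if val != 0 then (2 : Int) else p.2)) (s, init)
    = (s + l.length,
       (PySem.List.enumerate l s).foldl (fun ans iv =>
         if iv.1 == 2 || iv.1 == 5 then ans
         else if iv.2 != 0 then (2 : Int) else ans) init) := by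
  induction l generalizing s init with
  | nil => simp
  | cons v l ih =>
    simp only [List.foldl_cons, PySem.List.enumerate_cons, List.length_cons]
    rw [ih]
    have : s + 1 + (l.length : Int) = s + ((l.length + 1 : Nat) : Int) := by push_cast; ring
    rw [this]

theorem pvScanC (ch : List Int) (init : Int) :
    (PySem.List.enumerate ch 0).foldl (fun ans iv =>
      if iv.1 == 2 || iv.1 == 5 then ans
      else if iv.2 != 0 then (2 : Int) else ans) init
    = if pvC ch = true then 2 else init := by
  rw [pvScan_foldl]; rfl

theorem pvC_iff (ch : List Int) :
    pvC ch = true ↔ ∃ k : Nat, ∃ h : k < ch.length, pvBad ((k : Int), ch[k]) = true := by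
  unfold pvC
  rw [List.any_eq_true]
  constructor
  · rintro ⟨x, hx, hpx⟩
    obtain ⟨k, hk, rfl⟩ := (PySem.List.mem_enumerate_iff _ _ _).mp hx
    exact ⟨k, hk, by simpa using hpx⟩
  · rintro ⟨k, hk, hp⟩
    exact ⟨((k : Int), ch[k]),
      (PySem.List.mem_enumerate_iff _ _ _).mpr ⟨k, hk, by simp⟩, by simpa using hp⟩

theorem pvC_set_25 (ch : List Int) (j : Nat) (v : Int) (hj : j = 2 ∨ j = 5) :
    pvC (ch.set j v) = pvC ch := by
  rw [Bool.eq_iff_iff, pvC_iff, pvC_iff]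
  constructor
  · rintro ⟨k, hk, hbad⟩
    have hk' : k < ch.length := by simpa using hk
    refine ⟨k, hk', ?_⟩
    rcases eq_or_ne j k with rfl | hne
    · exfalso
      rcases hj with rfl | rfl <;> simp [pvBad] at hbad
    · rwa [List.getElem_set_ne hne] at hbad
  · rintro ⟨k, hk, hbad⟩
    refine ⟨k, by simpa using hk, ?_⟩
    rcases eq_or_ne j k with rfl | hne
    · exfalso
      rcases hj with rfl | rfl <;> simp [pvBad] at hbad
    · rwa [List.getElem_set_ne hne]

theorem pvC_set_bad (ch : List Int) (k : Nat) (v : Int) (hk : k < ch.length)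
    (hk25 : ¬ (k = 2 ∨ k = 5)) (hv : v ≠ 0) : pvC (ch.set k v) = true := by
  rw [pvC_iff]
  refine ⟨k, by simpa using hk, ?_⟩
  rw [List.getElem_set, if_pos rfl]
  have h2 : ((k : Int) == 2) = false := by
    apply beq_eq_false_iff_ne.mpr; intro h; exact hk25 (Or.inl (by exact_mod_cast h))
  have h5 : ((k : Int) == 5) = false := by
    apply beq_eq_false_iff_ne.mpr; intro h; exact hk25 (Or.inr (by exact_mod_cast h))
  simp [pvBad, h2, h5, hv]

theorem pvC_replicate (n : Nat) : pvC (List.replicate n (0 : Int)) = false := by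
  by_contra h
  rw [Bool.not_eq_false] at h
  obtain ⟨k, hk, hbad⟩ := (pvC_iff _).mp h
  simp [pvBad, List.getElem_replicate] at hbad

-- the coupling invariant of A's factorization loop with B's strip-2-and-5 value
theorem pvMain (fuel : Nat) (b c : Int) (ch : List Int)
    (hb : 1 ≤ b) (hc : 2 ≤ c)
    (hinv : ∀ d : Int, 2 ≤ d → d < c → ¬ d ∣ b)
    (hfuel : (2 * b - c).toNat ≤ fuel)
    (hlen : b < (ch.length : Int))
    (hnn : ∀ x ∈ ch, 0 ≤ x) :
    pvC (pvFactLoop fuel b c ch).2 = (pvC ch || (pvG b != 1)) := by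
  induction fuel generalizing b c ch with
  | zero =>
    rcases eq_or_ne b 1 with rfl | hb1
    · simp [pvFactLoop, pvG_one]
    · exfalso
      have hcb : c ≤ b := by
        by_contra hgt
        exact hinv b (by omega) (by omega) dvd_rfl
      omega
  | succ n ih =>
    rcases eq_or_ne b 1 with rfl | hb1
    · simp [pvFactLoop, pvG_one]
    · have hb2 : 2 ≤ b := by omega
      have hcb : c ≤ b := by
        by_contra hgt
        exact hinv b (by omega) (by omega) dvd_rfl
      have hbne : (b != 1) = true := bne_iff_ne.mpr hb1
      by_cases hd : c ∣ b
      · have hm : PySem.Int.mod b c = 0 := (PySem.Int.mod_eq_zero_iff_dvd b c).mpr hd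
        obtain ⟨hpos, hlt, hdvd, heq⟩ := pvDivStep b c hc hd hb
        have hprime : Prime c := pvInvPrime b c hb hc hd hinv
        have hgetE : PySem.List.pyGetD ch c 0 = ch[c.toNat]'(by omega) :=
          PySem.List.pyGetD_eq_getElem ch 0 (by omega) (by omega)
        have hget0 : 0 ≤ PySem.List.pyGetD ch c 0 := by
          rw [hgetE]
          exact hnn _ (List.getElem_mem _)
        simp only [pvFactLoop, hbne, hm, BEq.rfl, if_true]
        have hinv' : ∀ d : Int, 2 ≤ d → d < c → ¬ d ∣ PySem.Int.floordiv b c :=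
          fun d h2 h3 hdd => hinv d h2 h3 (hdd.trans hdvd)
        have hnn' : ∀ x ∈ ch.set c.toNat (PySem.List.pyGetD ch c 0 + 1), 0 ≤ x := by
          intro x hx
          rcases List.mem_or_eq_of_mem_set hx with h | rfl
          · exact hnn x h
          · omega
        rw [ih (PySem.Int.floordiv b c) c _ hpos hc hinv' (by omega)
            (by rw [List.length_set]; omega) hnn']
        rcases eq_or_ne c 2 with rfl | hc2
        · rw [pvC_set_25 ch ((2 : Int)).toNat _ (Or.inl rfl), ← pvG_two b hb hd]
        · rcases eq_or_ne c 5 with rfl | hc5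
          · have h2b : ¬ (2 : Int) ∣ b := hinv 2 (by omega) (by omega)
            rw [pvC_set_25 ch ((5 : Int)).toNat _ (Or.inr rfl), ← pvG_five b hb h2b hd]
          · have hset : pvC (ch.set c.toNat (PySem.List.pyGetD ch c 0 + 1)) = true := by
              apply pvC_set_bad ch c.toNat _ (by omega) (by omega) (by omega)
            have hnd2 : ¬ c ∣ 2 := fun h => by
              have := Int.le_of_dvd (by omega) h
              omega
            have hnd5 : ¬ c ∣ 5 := fun h => by
              have h5 := Int.le_of_dvd (by omega) h
              interval_cases c <;> omega
            have hGne : pvG b ≠ 1 := pvG_ne_one b c hb hprime hc hd hnd2 hnd5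
            have hGbne : (pvG b != 1) = true := bne_iff_ne.mpr hGne
            rw [hset, hGbne]
            simp
      · have hm : (PySem.Int.mod b c == 0) = false :=
          beq_eq_false_iff_ne.mpr (fun h => hd ((PySem.Int.mod_eq_zero_iff_dvd b c).mp h))
        simp only [pvFactLoop, hbne, hm, Bool.false_eq_true, if_false, if_true]
        have hinv' : ∀ d : Int, 2 ≤ d → d < c + 1 → ¬ d ∣ b := by
          intro d h2 h3 hdd
          rcases eq_or_ne d c with rfl | hne
          · exact hd hdd
          · exact hinv d h2 (by omega) hdd
        exact ih b (c + 1) ch hb (by omega) hinv' (by omega) hlen hnn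

-- the shared reduction fold keeps b positive and does not increase it
theorem pvReduceBound (l : List Int) (st : Int × Int) (B : Int)
    (hl : ∀ i ∈ l, 2 ≤ i) (h1 : 1 ≤ st.2) (h2 : st.2 ≤ B) :
    1 ≤ (l.foldl (fun (st : Int × Int) i =>
          if PySem.Int.mod st.1 i == 0 && PySem.Int.mod st.2 i == 0 then
            (PySem.Int.floordiv st.1 i, PySem.Int.floordiv st.2 i)
          else st) st).2 ∧
    (l.foldl (fun (st : Int × Int) i =>
          if PySem.Int.mod st.1 i == 0 && PySem.Int.mod st.2 i == 0 then
            (PySem.Int.floordiv st.1 i, PySem.Int.floordiv st.2 i)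
          else st) st).2 ≤ B := by
  revert hl h1 h2
  induction l generalizing st with
  | nil => intro _ h1 h2; exact ⟨h1, h2⟩
  | cons i l ih =>
    intro hl h1 h2
    have hi : 2 ≤ i := hl i List.mem_cons_self
    have hl' : ∀ j ∈ l, 2 ≤ j := fun j hj => hl j (List.mem_cons_of_mem _ hj)
    simp only [List.foldl_cons]
    by_cases hcond : (PySem.Int.mod st.1 i == 0 && PySem.Int.mod st.2 i == 0) = true
    · rw [if_pos hcond]
      have hdd : i ∣ st.2 :=
        (PySem.Int.mod_eq_zero_iff_dvd _ _).mp
          (beq_iff_eq.mp ((Bool.and_eq_true _ _).mp hcond).2)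
      obtain ⟨hpos, hlt, _, _⟩ := pvDivStep st.2 i hi hdd h1
      exact ih _ hl' hpos (by omega)
    · rw [if_neg hcond]
      exact ih _ hl' h1 h2

-- ===== VERDICT (by name: the statement is the Claim_ definition above) =====
theorem solution_spec : Claim_equal_solution := by
  intro a b _ hb
  show solution a b = solution_alt a b
  simp only [solution, solution_alt]
  set st := (PySem.List.pyRange 2 (a + 1) 1).foldl
      (fun (st : Int × Int) i =>
        if PySem.Int.mod st.1 i == 0 && PySem.Int.mod st.2 i == 0 then
          (PySem.Int.floordiv st.1 i, PySem.Int.floordiv st.2 i)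
        else st) (a, b) with hst
  have hrange : ∀ i ∈ PySem.List.pyRange 2 (a + 1) 1, 2 ≤ i := by
    intro i hi
    exact (PySem.List.mem_pyRange_one.mp hi).1
  have hbounds := pvReduceBound (PySem.List.pyRange 2 (a + 1) 1) (a, b) b hrange hb le_rfl
  rw [← hst] at hbounds
  obtain ⟨hpos, hle⟩ := hbounds
  have hlen : (List.replicate (b + 1).toNat (0 : Int)).length = (b + 1).toNat :=
    List.length_replicate
  have hmain := pvMain (2 * st.2).toNat st.2 2 (List.replicate (b + 1).toNat 0) hpos (by omega)
    (fun d h2 h3 _ => by omega) (by omega) (by rw [hlen]; omega)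
    (fun x hx => by rw [List.eq_of_mem_replicate hx])
  rw [pvScanIdx]
  simp only
  rw [pvScanC, hmain, pvC_replicate, Bool.false_or]
  have hGdef : pvStrip (pvStrip st.2.toNat st.2 2).toNat (pvStrip st.2.toNat st.2 2) 5
      = pvG st.2 := rfl
  rw [hGdef]
  by_cases hG : pvG st.2 = 1
  · have h1 : (pvG st.2 != 1) = false := by simp [hG]
    have h2 : (pvG st.2 == 1) = true := beq_iff_eq.mpr hG
    rw [h1, h2]
    simp
  · have h1 : (pvG st.2 != 1) = true := bne_iff_ne.mpr hG
    have h2 : (pvG st.2 == 1) = false := beq_eq_false_iff_ne.mpr hG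
    rw [h1, h2]
    simp
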